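-- pv_equiv track=rewrite | github.com/Kanish-cloobot/AI-Implementation-Designer | backend-code/services/unified_extraction_service.py | _count_total_extracted_items
-- ===== SOURCE A (Python) =====
-- def _count_total_extracted_items(extraction_data):
--     """Count total number of items extracted across all categories"""
--     total = 0
--     categories = [
--         'bu_teams', 'modules_processes', 'licenses', 'personas',
--         'requirements', 'risks_issues', 'action_items', 'decisions',
--         'dependencies', 'pain_points', 'current_state', 'target_state',
--         'integrations', 'data_migration', 'data_model', 'metadata_updates',
--         'scope_summary', 'assumptions_gaps', 'source_references'
--     ]
--
--     for category in categories:
--         if category in extraction_data and isinstance(extraction_data[category], list):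
--             total += len(extraction_data[category])
--
--     return total
-- ===== SOURCE B (Python) =====
-- _CATEGORIES = {
--     'bu_teams', 'modules_processes', 'licenses', 'personas',
--     'requirements', 'risks_issues', 'action_items', 'decisions',
--     'dependencies', 'pain_points', 'current_state', 'target_state',
--     'integrations', 'data_migration', 'data_model', 'metadata_updates',
--     'scope_summary', 'assumptions_gaps', 'source_references'
-- }
--
--
-- def _count_total_extracted_items(extraction_data):
--     """Count total number of items extracted across all categories"""
--     total = 0
--     for key, value in extraction_data.items():
--         if key in _CATEGORIES and isinstance(value, list):
--             total += len(value)
--     return total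
-- ===== Notes on version B (the rewrite author's own statement) =====
-- stated objective: alternative
-- what changed: B inverts the traversal: instead of probing the dict once for each of the 19 fixed category names, it makes one pass over the dict's own items and adds len(value) when the key belongs to a precomputed category set.
import Mathlib
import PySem

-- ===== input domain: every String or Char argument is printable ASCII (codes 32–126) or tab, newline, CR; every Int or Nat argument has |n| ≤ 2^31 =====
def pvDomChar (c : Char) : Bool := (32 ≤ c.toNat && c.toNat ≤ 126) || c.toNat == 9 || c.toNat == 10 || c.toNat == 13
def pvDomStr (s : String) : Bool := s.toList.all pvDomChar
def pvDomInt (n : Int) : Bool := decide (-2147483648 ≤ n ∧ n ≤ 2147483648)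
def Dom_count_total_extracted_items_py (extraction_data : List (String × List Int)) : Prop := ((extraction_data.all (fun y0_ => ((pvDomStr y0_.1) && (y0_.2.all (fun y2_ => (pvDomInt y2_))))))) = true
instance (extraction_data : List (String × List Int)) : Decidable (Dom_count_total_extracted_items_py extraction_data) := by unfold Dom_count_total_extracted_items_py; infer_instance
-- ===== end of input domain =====

-- B inverts the traversal: it sums lengths in one pass over the dict's items with a
-- set-membership test, instead of probing the dict for each of the 19 fixed categories.

-- ===== PORT A =====
-- the fixed category list of A
def pvCategories : List String :=
  ["bu_teams", "modules_processes", "licenses", "personas",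
   "requirements", "risks_issues", "action_items", "decisions",
   "dependencies", "pain_points", "current_state", "target_state",
   "integrations", "data_migration", "data_model", "metadata_updates",
   "scope_summary", "assumptions_gaps", "source_references"]

-- hand port of Python dict lookup on the association list (first match = the dict's
-- unique binding under Pre_); exact for 'category in extraction_data' (isSome) and
-- 'extraction_data[category]'
def pvLookup : List (String × List Int) → String → Option (List Int)
  | [], _ => none
  | (k, v) :: rest, c => if k == c then some v else pvLookup rest c

def count_total_extracted_items_py (extraction_data : List (String × List Int)) : Int :=
  -- isinstance(extraction_data[category], list) is always true under the stated type
  pvCategories.foldl (fun total c =>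
    match pvLookup extraction_data c with
    | some v => total + (v.length : Int)
    | none => total) 0

-- ===== PORT B =====
def pvCatSet : PySem.Set String := PySem.Set.ofList pvCategories

def count_total_extracted_items_py_alt (extraction_data : List (String × List Int)) : Int :=
  extraction_data.foldl (fun total kv =>
    if PySem.Set.contains pvCatSet kv.1 then total + (kv.2.length : Int) else total) 0

-- ===== PRECONDITION & SPEC =====
-- Pre_ only requires that the association list has no duplicate keys: a Python dict
-- cannot have duplicate keys, so this excludes no input the Python function ever sees.
def Pre_count_total_extracted_items_py (extraction_data : List (String × List Int)) : Prop :=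
  (extraction_data.map Prod.fst).Nodup
instance (extraction_data : List (String × List Int)) : Decidable (Pre_count_total_extracted_items_py extraction_data) := by unfold Pre_count_total_extracted_items_py; infer_instance

def pvWitness_count_total_extracted_items_py : (List (String × List Int)) :=
  [("licenses", [1, 2]), ("other", [3]), ("risks_issues", [])]

def Spec_count_total_extracted_items_py (extraction_data : List (String × List Int)) (out : Int) : Prop := out = count_total_extracted_items_py_alt extraction_data
instance (extraction_data : List (String × List Int)) (out : Int) : Decidable (Spec_count_total_extracted_items_py extraction_data out) := by unfold Spec_count_total_extracted_items_py; infer_instance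

-- ===== CLAIM (what is proved, stated in full; the proofs are below) =====
def Claim_equal_count_total_extracted_items_py : Prop := ∀ (extraction_data : List (String × List Int)), Dom_count_total_extracted_items_py extraction_data → Pre_count_total_extracted_items_py extraction_data → Spec_count_total_extracted_items_py extraction_data (count_total_extracted_items_py extraction_data)

-- ===== LEMMAS AND PROOFS =====

-- length of an optional list, 0 for none (A's per-category contribution)
def pvLenI (o : Option (List Int)) : Int :=
  match o with
  | some v => (v.length : Int)
  | none => 0

theorem pvA_foldl_sum (d : List (String × List Int)) :
    ∀ (cats : List String) (a : Int),
      cats.foldl (fun total c =>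
        match pvLookup d c with
        | some v => total + (v.length : Int)
        | none => total) a
      = a + (cats.map (fun c => pvLenI (pvLookup d c))).sum := by
  intro cats
  induction cats with
  | nil => simp
  | cons c cs ih =>
    intro a
    simp only [List.foldl_cons, List.map_cons, List.sum_cons, ih]
    cases h : pvLookup d c <;> simp [pvLenI, h] <;> ring_nf

theorem pvB_foldl_sum :
    ∀ (d : List (String × List Int)) (a : Int),
      d.foldl (fun total kv =>
        if PySem.Set.contains pvCatSet kv.1 then total + (kv.2.length : Int) else total) a
      = a + (d.map (fun kv => if kv.1 ∈ pvCategories then (kv.2.length : Int) else 0)).sum := by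
  intro d
  induction d with
  | nil => simp
  | cons kv rest ih =>
    intro a
    simp only [List.foldl_cons, List.map_cons, List.sum_cons, ih]
    have hmem : kv.1 ∈ pvCatSet ↔ kv.1 ∈ pvCategories := by
      simp [pvCatSet, PySem.Set.mem_ofList]
    by_cases h : kv.1 ∈ pvCategories
    · simp [hmem.mpr h, h]; ring
    · have hnm : kv.1 ∉ pvCatSet := fun hc => h (hmem.mp hc)
      simp [hnm, h]

theorem pvSum_map_update (k : String) (w : Int) (f : String → Int) :
    ∀ (cats : List String), cats.Nodup →
      (cats.map (fun c => if k = c then w else f c)).sum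
        = (cats.map f).sum + (if k ∈ cats then w - f k else 0) := by
  intro cats
  induction cats with
  | nil => simp
  | cons c cs ih =>
    intro hnd
    have hnd' := hnd.of_cons
    have hcn : c ∉ cs := (List.nodup_cons.mp hnd).1
    by_cases h : k = c
    · subst h
      have : (cs.map (fun c => if k = c then w else f c)) = cs.map f := by
        apply List.map_congr_left
        intro x hx
        have : k ≠ x := fun he => hcn (he ▸ hx)
        simp [this]
      simp [this, List.mem_cons]
      ring
    · simp only [List.map_cons, List.sum_cons, if_neg h, ih hnd', List.mem_cons]
      have : (k = c ∨ k ∈ cs) ↔ k ∈ cs := by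
        constructor
        · rintro (rfl | hk)
          · exact absurd rfl h
          · exact hk
        · exact Or.inr
      rw [if_congr this rfl rfl]
      ring

theorem pvLookup_none_of_not_mem (d : List (String × List Int)) (k : String)
    (h : k ∉ d.map Prod.fst) : pvLookup d k = none := by
  induction d with
  | nil => rfl
  | cons kv rest ih =>
    obtain ⟨k', v⟩ := kv
    simp only [List.map_cons, List.mem_cons] at h
    have h1 : k ≠ k' := fun he => h (Or.inl he)
    have h2 : k ∉ rest.map Prod.fst := fun hm => h (Or.inr hm)
    simp [pvLookup, ih h2, Ne.symm h1]

theorem pvMain (d : List (String × List Int)) (hnd : (d.map Prod.fst).Nodup) :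
    (pvCategories.map (fun c => pvLenI (pvLookup d c))).sum
      = (d.map (fun kv => if kv.1 ∈ pvCategories then (kv.2.length : Int) else 0)).sum := by
  induction d with
  | nil => simp [pvLookup, pvLenI]
  | cons kv rest ih =>
    obtain ⟨k, v⟩ := kv
    simp only [List.map_cons, List.nodup_cons] at hnd
    obtain ⟨hk, hnd'⟩ := hnd
    have hstep : (pvCategories.map (fun c => pvLenI (pvLookup ((k, v) :: rest) c)))
        = pvCategories.map (fun c => if k = c then (v.length : Int) else pvLenI (pvLookup rest c)) := by
      apply List.map_congr_left
      intro c _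
      by_cases h : k = c
      · simp [pvLookup, pvLenI, h]
      · simp [pvLookup, pvLenI, h]
    have hcatnd : pvCategories.Nodup := by decide
    rw [hstep, pvSum_map_update k (v.length : Int) (fun c => pvLenI (pvLookup rest c)) pvCategories hcatnd,
        ih hnd']
    have hnone : pvLookup rest k = none := pvLookup_none_of_not_mem rest k hk
    simp only [hnone, pvLenI, List.map_cons, List.sum_cons]
    by_cases h : k ∈ pvCategories <;> simp [h] <;> ring

-- ===== VERDICT (by name: the statement is the Claim_ definition above) =====
theorem count_total_extracted_items_py_spec : Claim_equal_count_total_extracted_items_py := by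
  intro d _ hpre
  unfold Spec_count_total_extracted_items_py
  unfold count_total_extracted_items_py count_total_extracted_items_py_alt
  rw [pvA_foldl_sum, pvB_foldl_sum, pvMain d hpre]
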